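-- pv_equiv track=rewrite | github.com/prkty/JungleBackjoon | Week02/Prac/18. 2504 괄호의 값.py | cal_UVPS_value
-- ===== SOURCE A (Python) =====
-- def cal_UVPS_value(UVPS):
--     stack = []
--     temp = 1
--     result = 0
--
--     for i in range(len(UVPS)):
--         char = UVPS[i]
--
--         if char == '(':
--             stack.append(char)
--             temp *= 2     # ()는 2를 곱한다.
--
--         elif char == '[':
--             stack.append(char)
--             temp *= 3    # []는 3을 곱한다.
--
--         elif char == ')':
--             if not stack or stack[-1] != '(':  # 스택이 비어있지 않거나 최근 값이 (이 아닌경우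
--                 return 0   # 아무것도 리턴하지 않음
--             if UVPS[i-1] == '(':   # 즉시 계산 가능시 추가
--                 result += temp    # 현재의 temp값을 더합니다.
--             stack.pop()    # (를 제거합니다.
--             temp //= 2   # 닫힌 괄호가 나왔으므로 2로 나눕니다.(원상태 복구)
--
--         elif char == ']':
--             if not stack or stack[-1] != '[':  # 스택이 비어있지 않거나 최근 값이 [이 아닌경우
--                 return 0
--             if UVPS[i-1] == '[':  # 즉시 계산할 수 있는 `[]` 패턴
--                 result += temp  # 현재 temp 값을 추가
--             stack.pop()  # [를 제거합니다
--             temp //= 3  # 닫힌 괄호가 나왔으므로 3으로 나눈다.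
--
--         # 모든 연산이 끝났을 때 스택이 비어있어야 함 (올바른 괄호 문자열인지 체크)
--     if stack:
--         return 0
--
--     return result
-- ===== SOURCE B (Python) =====
-- def cal_UVPS_value(UVPS):
--     # Single value stack: open brackets are pushed as markers, every other
--     # character is a token of value 0; a closer folds the values above the
--     # matching marker into one value (base 2/3, multiplied when non-immediate).
--     stack = []
--     for c in UVPS:
--         if c == '(' or c == '[':
--             stack.append(c)
--         elif c == ')' or c == ']':
--             s = 0
--             seen = False
--             while stack and isinstance(stack[-1], int):
--                 s += stack.pop()
--                 seen = True
--             if not stack: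
--                 return 0
--             m = stack.pop()
--             opener, base = ('(', 2) if c == ')' else ('[', 3)
--             if m != opener:
--                 return 0
--             stack.append(base if not seen else base * s)
--         else:
--             stack.append(0)
--     if any(isinstance(x, str) for x in stack):
--         return 0
--     return sum(stack)
-- ===== Notes on version B (the rewrite author's own statement) =====
-- stated objective: alternative
-- what changed: A tracks a char stack plus a running product of multipliers and adds it on immediately-adjacent pairs; B keeps a single mixed stack of bracket markers and integer values (non-bracket chars become 0-valued tokens), folds the values above the matching marker on each closer, and sums the stack at the end.
import Mathlib
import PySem

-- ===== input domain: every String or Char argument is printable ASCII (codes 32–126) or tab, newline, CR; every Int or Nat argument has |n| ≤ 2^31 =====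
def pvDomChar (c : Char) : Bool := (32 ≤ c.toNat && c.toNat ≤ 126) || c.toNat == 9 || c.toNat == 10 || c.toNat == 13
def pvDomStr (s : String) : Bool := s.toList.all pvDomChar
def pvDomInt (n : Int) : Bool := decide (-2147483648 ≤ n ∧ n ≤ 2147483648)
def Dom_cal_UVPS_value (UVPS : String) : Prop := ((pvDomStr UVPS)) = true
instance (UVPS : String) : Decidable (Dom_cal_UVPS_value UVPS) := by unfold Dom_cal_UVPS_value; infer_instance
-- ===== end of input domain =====

-- B replaces A's (char-stack, running product temp, accumulator) scan by a single
-- mixed value stack (markers + integer values) folded on each closing bracket: alternative decomposition, same cost.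

-- ===== PORT A =====
-- Python stack appends/pops at the end; here the list head is the stack top (stack[-1] = head?).
def pvALoop (cs : List Char) (i : Nat) (stack : List Char) (temp result : Int) : Int :=
  if h : i < cs.length then
    let c := cs[i]
    if c = '(' then pvALoop cs (i+1) ('(' :: stack) (temp * 2) result
    else if c = '[' then pvALoop cs (i+1) ('[' :: stack) (temp * 3) result
    else if c = ')' then
      if stack = [] ∨ stack.head? ≠ some '(' then 0
      else
        pvALoop cs (i+1) stack.tail (PySem.Int.floordiv temp 2)
          (if PySem.List.pyGet? cs ((i : Int) - 1) = some '(' then result + temp else result)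
    else if c = ']' then
      if stack = [] ∨ stack.head? ≠ some '[' then 0
      else
        pvALoop cs (i+1) stack.tail (PySem.Int.floordiv temp 3)
          (if PySem.List.pyGet? cs ((i : Int) - 1) = some '[' then result + temp else result)
    else pvALoop cs (i+1) stack temp result
  else if stack ≠ [] then 0 else result
termination_by cs.length - i

def cal_UVPS_value (UVPS : String) : Int := pvALoop UVPS.toList 0 [] 1 0

-- ===== PORT B =====
-- Stack item: an open-bracket marker ('(' → o2, '[' → o3) or an integer value.
inductive PVTok where
  | o2 : PVTok
  | o3 : PVTok
  | v : Int → PVTok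
deriving DecidableEq

def pvIsMarker : PVTok → Bool
  | PVTok.o2 => true
  | PVTok.o3 => true
  | PVTok.v _ => false

-- 'while stack and isinstance(stack[-1], int): s += stack.pop(); seen = True'
def pvPopInts : List PVTok → Int × Bool × List PVTok
  | PVTok.v n :: rest =>
      let (s, _, r) := pvPopInts rest
      (s + n, true, r)
  | st => (0, false, st)

-- 'sum(stack)' over the remaining integer values
def pvSumVals : List PVTok → Int
  | [] => 0
  | PVTok.v n :: r => n + pvSumVals r
  | _ :: r => pvSumVals r

def pvBLoop : List Char → List PVTok → Int
  | [], st => if st.any pvIsMarker then 0 else pvSumVals st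
  | c :: cs, st =>
    if c = '(' then pvBLoop cs (PVTok.o2 :: st)
    else if c = '[' then pvBLoop cs (PVTok.o3 :: st)
    else if c = ')' ∨ c = ']' then
      let (s, seen, rest) := pvPopInts st
      match rest with
      | [] => 0
      | m :: rest' =>
        let want := if c = ')' then PVTok.o2 else PVTok.o3
        let base : Int := if c = ')' then 2 else 3
        if m ≠ want then 0
        else pvBLoop cs (PVTok.v (if seen then base * s else base) :: rest')
    else pvBLoop cs (PVTok.v 0 :: st)

def cal_UVPS_value_alt (UVPS : String) : Int := pvBLoop UVPS.toList []

-- ===== PRECONDITION & SPEC =====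
def Spec_cal_UVPS_value (UVPS : String) (out : Int) : Prop := out = cal_UVPS_value_alt UVPS
instance (UVPS : String) (out : Int) : Decidable (Spec_cal_UVPS_value UVPS out) := by unfold Spec_cal_UVPS_value; infer_instance

-- ===== CLAIM (what is proved, stated in full; the proofs are below) =====
def Claim_equal_cal_UVPS_value : Prop := ∀ (UVPS : String), Dom_cal_UVPS_value UVPS → Spec_cal_UVPS_value UVPS (cal_UVPS_value UVPS)

-- ===== LEMMAS AND PROOFS =====

-- the chars of the markers in B's stack, top first (= A's stack)
def pvMarkers : List PVTok → List Char
  | [] => []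
  | PVTok.o2 :: r => '(' :: pvMarkers r
  | PVTok.o3 :: r => '[' :: pvMarkers r
  | PVTok.v _ :: r => pvMarkers r

def pvMult (c : Char) : Int := if c = '(' then 2 else 3

def pvProd : List Char → Int
  | [] => 1
  | c :: r => pvMult c * pvProd r

-- A's accumulated result, read off B's stack: each value weighted by the product of the markers below it
def pvF : List PVTok → Int
  | [] => 0
  | PVTok.v n :: r => n * pvProd (pvMarkers r) + pvF r
  | _ :: r => pvF r

-- the marker char on top of B's stack, if any
def pvTop : List PVTok → Option Char
  | PVTok.o2 :: _ => some '('
  | PVTok.o3 :: _ => some '['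
  | _ => none

lemma pvPopInts_markers (st : List PVTok) : pvMarkers (pvPopInts st).2.2 = pvMarkers st := by
  induction st with
  | nil => simp [pvPopInts]
  | cons h r ih => cases h <;> simp [pvPopInts, pvMarkers, ih]

lemma pvPopInts_f (st : List PVTok) :
    pvF st = (pvPopInts st).1 * pvProd (pvMarkers st) + pvF (pvPopInts st).2.2 := by
  induction st with
  | nil => simp [pvPopInts, pvF]
  | cons h r ih =>
    cases h with
    | o2 => simp [pvPopInts, pvF]
    | o3 => simp [pvPopInts, pvF]
    | v n =>
      simp only [pvPopInts, pvF, pvMarkers]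
      rw [ih]
      ring

lemma pvPopInts_rest_head (st : List PVTok) (t : PVTok) :
    (pvPopInts st).2.2.head? = some t → pvIsMarker t = true := by
  induction st with
  | nil => intro h; simp [pvPopInts] at h
  | cons h r ih =>
    cases h with
    | o2 => intro h'; simp [pvPopInts] at h'; simp [h'.symm, pvIsMarker]
    | o3 => intro h'; simp [pvPopInts] at h'; simp [h'.symm, pvIsMarker]
    | v n => simpa [pvPopInts] using ih

lemma pvPopInts_seen_false (st : List PVTok) :
    (pvPopInts st).2.1 = false → (pvPopInts st).2.2 = st ∧ (pvPopInts st).1 = 0 := by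
  cases st with
  | nil => intro _; simp [pvPopInts]
  | cons h r => cases h <;> simp [pvPopInts]

lemma pvPopInts_seen_true (st : List PVTok) :
    (pvPopInts st).2.1 = true → pvTop st = none := by
  cases st with
  | nil => intro h; simp [pvPopInts] at h
  | cons h r => cases h <;> simp [pvPopInts, pvTop]

lemma pvAny_marker (st : List PVTok) : st.any pvIsMarker = true ↔ pvMarkers st ≠ [] := by
  induction st with
  | nil => simp [pvMarkers]
  | cons h r ih => cases h <;> simp [pvMarkers, pvIsMarker, ih]

lemma pvF_no_markers (st : List PVTok) : pvMarkers st = [] → pvF st = pvSumVals st := by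
  induction st with
  | nil => simp [pvF, pvSumVals]
  | cons h r ih =>
    cases h with
    | o2 => intro hm; simp [pvMarkers] at hm
    | o3 => intro hm; simp [pvMarkers] at hm
    | v n =>
      intro hm
      simp only [pvMarkers] at hm
      simp [pvF, pvSumVals, hm, pvProd, ih hm]

theorem pvMain (cs : List Char) (i : Nat) (stA : List Char) (temp res : Int) (stB : List PVTok)
    (h1 : pvMarkers stB = stA) (h2 : temp = pvProd stA) (h3 : res = pvF stB)
    (h4 : stB ≠ [] → 0 < i)
    (h5 : 0 < i → ∀ c0 : Char, c0 = '(' ∨ c0 = '[' →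
        (PySem.List.pyGet? cs ((i : Int) - 1) = some c0 ↔ pvTop stB = some c0)) :
    pvALoop cs i stA temp res = pvBLoop (List.drop i cs) stB := by
  by_cases hi : i < cs.length
  · have hd : List.drop i cs = cs[i] :: List.drop (i+1) cs := List.drop_eq_getElem_cons hi
    have hidx : ∀ c0 : Char,
        (PySem.List.pyGet? cs (((i+1 : Nat) : Int) - 1) = some c0) ↔ cs[i] = c0 := by
      intro c0
      have hcast : (((i+1 : Nat)) : Int) - 1 = (i : Int) := by push_cast; ring
      rw [hcast, PySem.List.pyGet?_natCast, List.getElem?_eq_getElem hi]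
      simp
    rw [pvALoop, dif_pos hi, hd]
    by_cases hc1 : cs[i] = '('
    · rw [if_pos hc1, pvBLoop, if_pos hc1]
      exact pvMain cs (i+1) ('(' :: stA) (temp * 2) res (PVTok.o2 :: stB)
        (by simp [pvMarkers, h1]) (by simp [pvProd, pvMult, h2]; ring) h3
        (fun _ => Nat.succ_pos i)
        (by
          intro _ c0 hc0
          rw [hidx c0, hc1]
          rcases hc0 with rfl | rfl <;> simp [pvTop])
    · by_cases hc2 : cs[i] = '['
      · rw [if_neg hc1, if_pos hc2, pvBLoop, if_neg hc1, if_pos hc2]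
        exact pvMain cs (i+1) ('[' :: stA) (temp * 3) res (PVTok.o3 :: stB)
          (by simp [pvMarkers, h1]) (by simp [pvProd, pvMult, h2]; ring) h3
          (fun _ => Nat.succ_pos i)
          (by
            intro _ c0 hc0
            rw [hidx c0, hc2]
            rcases hc0 with rfl | rfl <;> simp [pvTop])
      · by_cases hc3 : cs[i] = ')'
        · -- closing ')' branch
          rw [if_neg hc1, if_neg hc2, if_pos hc3]
          rcases hps : pvPopInts stB with ⟨s, seen, rest⟩
          have hmk : pvMarkers rest = stA := by
            have := pvPopInts_markers stB; rw [hps] at this; rw [← h1, this]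
          cases hA : stA with
          | nil =>
            rw [if_pos (Or.inl rfl)]
            rw [hA] at hmk
            cases rest with
            | nil =>
              rw [pvBLoop, if_neg hc1, if_neg hc2, if_pos (Or.inl hc3), hps]
            | cons m rest' =>
              have hm := pvPopInts_rest_head stB m (by rw [hps]; rfl)
              cases m <;> simp_all [pvMarkers, pvIsMarker]
          | cons cA tA =>
            rw [hA] at hmk
            cases rest with
            | nil => simp [pvMarkers] at hmk
            | cons m rest' =>
              have hm := pvPopInts_rest_head stB m (by rw [hps]; rfl)
              cases m with
              | v n => simp [pvIsMarker] at hm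
              | o3 =>
                simp only [pvMarkers, List.cons.injEq] at hmk
                rw [if_pos (Or.inr (by simp [← hmk.1]))]
                rw [pvBLoop, if_neg hc1, if_neg hc2, if_pos (Or.inl hc3), hps]
                simp [hc3]
              | o2 =>
                simp only [pvMarkers, List.cons.injEq] at hmk
                have hcA : cA = '(' := hmk.1.symm
                have hbl : pvBLoop (cs[i] :: List.drop (i+1) cs) stB =
                    pvBLoop (List.drop (i+1) cs) (PVTok.v (if seen then 2 * s else 2) :: rest') := by
                  rw [pvBLoop, if_neg hc1, if_neg hc2, if_pos (Or.inl hc3), hps]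
                  simp [hc3]
                rw [if_neg (by simp [hcA]), hbl]
                have hBne : stB ≠ [] := by
                  intro h; rw [h] at h1; rw [hA] at h1; simp [pvMarkers] at h1
                have hipos : 0 < i := h4 hBne
                have hseen : PySem.List.pyGet? cs ((i : Int) - 1) = some '(' ↔ seen = false := by
                  rw [h5 hipos '(' (by decide)]
                  constructor
                  · intro ht
                    by_contra hs
                    have := pvPopInts_seen_true stB (by rw [hps]; simpa using hs)
                    rw [this] at ht; simp at ht
                  · intro hs
                    have := pvPopInts_seen_false stB (by rw [hps]; exact hs)
                    rw [hps] at this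
                    rw [← this.1]
                    rfl
                have htemp : PySem.Int.floordiv temp 2 = pvProd tA := by
                  rw [PySem.Int.floordiv_eq_ediv_of_pos (by norm_num), h2, hA, pvProd, pvMult, hcA]
                  simp
                have hfB : pvF stB = s * (2 * pvProd tA) + pvF rest' := by
                  have hf := pvPopInts_f stB
                  rw [hps] at hf
                  simp only [pvF] at hf
                  rw [hf, h1, hA]
                  simp [pvProd, pvMult, hcA]
                have h5' : (0 : Nat) < i + 1 → ∀ c0 : Char, c0 = '(' ∨ c0 = '[' →
                    (PySem.List.pyGet? cs (((i+1 : Nat) : Int) - 1) = some c0 ↔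
                      pvTop (PVTok.v (if seen then 2 * s else 2) :: rest') = some c0) := by
                  intro _ c0 hc0
                  rw [hidx c0, hc3]
                  rcases hc0 with rfl | rfl <;> simp [pvTop]
                cases hsv : seen with
                | false =>
                  rw [if_pos (hseen.mpr hsv)]
                  have hrest := pvPopInts_seen_false stB (by rw [hps]; exact hsv)
                  rw [hps] at hrest
                  refine pvMain cs (i+1) tA (PySem.Int.floordiv temp 2) (res + temp)
                    (PVTok.v 2 :: rest') ?_ htemp ?_ (fun _ => Nat.succ_pos i) (by simpa [hsv] using h5')
                  · simp [pvMarkers, hmk.2]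
                  · have hstB : stB = PVTok.o2 :: rest' := by rw [← hrest.1]
                    rw [h3, hstB, h2, hA]
                    simp [pvF, pvProd, pvMult, hcA, hmk.2]
                    try ring
                | true =>
                  rw [if_neg (by rw [hseen]; simp; exact hsv)]
                  refine pvMain cs (i+1) tA (PySem.Int.floordiv temp 2) res
                    (PVTok.v (2 * s) :: rest') ?_ htemp ?_ (fun _ => Nat.succ_pos i) (by simpa [hsv] using h5')
                  · simp [pvMarkers, hmk.2]
                  · rw [h3, hfB]
                    simp [pvF, hmk.2]
                    try ring
        · by_cases hc4 : cs[i] = ']'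
          · -- closing ']' branch (mirror of ')')
            rw [if_neg hc1, if_neg hc2, if_neg hc3, if_pos hc4]
            rcases hps : pvPopInts stB with ⟨s, seen, rest⟩
            have hmk : pvMarkers rest = stA := by
              have := pvPopInts_markers stB; rw [hps] at this; rw [← h1, this]
            cases hA : stA with
            | nil =>
              rw [if_pos (Or.inl rfl)]
              rw [hA] at hmk
              cases rest with
              | nil =>
                rw [pvBLoop, if_neg hc1, if_neg hc2, if_pos (Or.inr hc4), hps]
              | cons m rest' =>
                have hm := pvPopInts_rest_head stB m (by rw [hps]; rfl)
                cases m <;> simp_all [pvMarkers, pvIsMarker]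
            | cons cA tA =>
              rw [hA] at hmk
              cases rest with
              | nil => simp [pvMarkers] at hmk
              | cons m rest' =>
                have hm := pvPopInts_rest_head stB m (by rw [hps]; rfl)
                cases m with
                | v n => simp [pvIsMarker] at hm
                | o2 =>
                  simp only [pvMarkers, List.cons.injEq] at hmk
                  rw [if_pos (Or.inr (by simp [← hmk.1]))]
                  rw [pvBLoop, if_neg hc1, if_neg hc2, if_pos (Or.inr hc4), hps]
                  simp [hc4]
                | o3 =>
                  simp only [pvMarkers, List.cons.injEq] at hmk
                  have hcA : cA = '[' := hmk.1.symm
                  have hbl : pvBLoop (cs[i] :: List.drop (i+1) cs) stB =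
                      pvBLoop (List.drop (i+1) cs) (PVTok.v (if seen then 3 * s else 3) :: rest') := by
                    rw [pvBLoop, if_neg hc1, if_neg hc2, if_pos (Or.inr hc4), hps]
                    simp [hc4]
                  rw [if_neg (by simp [hcA]), hbl]
                  have hBne : stB ≠ [] := by
                    intro h; rw [h] at h1; rw [hA] at h1; simp [pvMarkers] at h1
                  have hipos : 0 < i := h4 hBne
                  have hseen : PySem.List.pyGet? cs ((i : Int) - 1) = some '[' ↔ seen = false := by
                    rw [h5 hipos '[' (by decide)]
                    constructor
                    · intro ht
                      by_contra hs
                      have := pvPopInts_seen_true stB (by rw [hps]; simpa using hs)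
                      rw [this] at ht; simp at ht
                    · intro hs
                      have := pvPopInts_seen_false stB (by rw [hps]; exact hs)
                      rw [hps] at this
                      rw [← this.1]
                      rfl
                  have htemp : PySem.Int.floordiv temp 3 = pvProd tA := by
                    rw [PySem.Int.floordiv_eq_ediv_of_pos (by norm_num), h2, hA, pvProd, pvMult, hcA]
                    simp
                  have hfB : pvF stB = s * (3 * pvProd tA) + pvF rest' := by
                    have hf := pvPopInts_f stB
                    rw [hps] at hf
                    simp only [pvF] at hf
                    rw [hf, h1, hA]
                    simp [pvProd, pvMult, hcA]
                  have h5' : (0 : Nat) < i + 1 → ∀ c0 : Char, c0 = '(' ∨ c0 = '[' →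
                      (PySem.List.pyGet? cs (((i+1 : Nat) : Int) - 1) = some c0 ↔
                        pvTop (PVTok.v (if seen then 3 * s else 3) :: rest') = some c0) := by
                    intro _ c0 hc0
                    rw [hidx c0, hc4]
                    rcases hc0 with rfl | rfl <;> simp [pvTop]
                  cases hsv : seen with
                  | false =>
                    rw [if_pos (hseen.mpr hsv)]
                    have hrest := pvPopInts_seen_false stB (by rw [hps]; exact hsv)
                    rw [hps] at hrest
                    refine pvMain cs (i+1) tA (PySem.Int.floordiv temp 3) (res + temp)
                      (PVTok.v 3 :: rest') ?_ htemp ?_ (fun _ => Nat.succ_pos i) (by simpa [hsv] using h5')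
                    · simp [pvMarkers, hmk.2]
                    · have hstB : stB = PVTok.o3 :: rest' := by rw [← hrest.1]
                      rw [h3, hstB, h2, hA]
                      simp [pvF, pvProd, pvMult, hcA, hmk.2]
                      try ring
                  | true =>
                    rw [if_neg (by rw [hseen]; simp; exact hsv)]
                    refine pvMain cs (i+1) tA (PySem.Int.floordiv temp 3) res
                      (PVTok.v (3 * s) :: rest') ?_ htemp ?_ (fun _ => Nat.succ_pos i) (by simpa [hsv] using h5')
                    · simp [pvMarkers, hmk.2]
                    · rw [h3, hfB]
                      simp [pvF, hmk.2]
                      try ring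
          · -- other character: A skips it, B pushes value 0
            rw [if_neg hc1, if_neg hc2, if_neg hc3, if_neg hc4]
            rw [pvBLoop, if_neg hc1, if_neg hc2,
              if_neg (by rw [not_or]; exact ⟨hc3, hc4⟩)]
            exact pvMain cs (i+1) stA temp res (PVTok.v 0 :: stB)
              (by simpa [pvMarkers] using h1) h2
              (by simp [pvF, h3])
              (fun _ => Nat.succ_pos i)
              (by
                intro _ c0 hc0
                rw [hidx c0]
                rcases hc0 with rfl | rfl <;> simp [pvTop] <;> assumption)
  · rw [pvALoop, dif_neg hi, List.drop_of_length_le (by omega), pvBLoop]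
    by_cases hA : stA = []
    · rw [if_neg (by simp [hA]), if_neg (by rw [pvAny_marker, h1, hA]; simp)]
      rw [h3, pvF_no_markers stB (by rw [h1, hA])]
    · rw [if_pos hA, if_pos (by rw [pvAny_marker, h1]; exact hA)]
termination_by cs.length - i

-- ===== VERDICT (by name: the statement is the Claim_ definition above) =====
theorem cal_UVPS_value_spec : Claim_equal_cal_UVPS_value := by
  intro UVPS _
  show cal_UVPS_value UVPS = cal_UVPS_value_alt UVPS
  have := pvMain UVPS.toList 0 [] 1 0 [] rfl rfl rfl (by simp) (by omega)
  simpa [cal_UVPS_value, cal_UVPS_value_alt] using this
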